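-- pv_equiv track=rewrite | github.com/akos1106/Prog | szovegfeldolgozas.py | count_words_and_letters
-- ===== SOURCE A (Python) =====
-- def count_words_and_letters(message):
--     word_list=[]
--     letter_count=0
--     tmp=message.split(' ')
--     for word in tmp:
--         if word!="":
--             word_list.append(word)
--             letter_count+=len(word)
--     return (word_list,len(word_list),letter_count)
-- ===== SOURCE B (Python) =====
-- def count_words_and_letters(message):
--     words = [w for w in message.split(' ') if w]
--     return (words, len(words), len(message) - message.count(' '))
-- ===== Notes on version B (the rewrite author's own statement) =====
-- stated objective: simpler
-- what changed: Replaces the accumulator loop (append + running letter sum) by a filtering comprehension for the words and a closed-form letter count: total length minus the number of space characters, eliminating the running-sum state entirely.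
import Mathlib
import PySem

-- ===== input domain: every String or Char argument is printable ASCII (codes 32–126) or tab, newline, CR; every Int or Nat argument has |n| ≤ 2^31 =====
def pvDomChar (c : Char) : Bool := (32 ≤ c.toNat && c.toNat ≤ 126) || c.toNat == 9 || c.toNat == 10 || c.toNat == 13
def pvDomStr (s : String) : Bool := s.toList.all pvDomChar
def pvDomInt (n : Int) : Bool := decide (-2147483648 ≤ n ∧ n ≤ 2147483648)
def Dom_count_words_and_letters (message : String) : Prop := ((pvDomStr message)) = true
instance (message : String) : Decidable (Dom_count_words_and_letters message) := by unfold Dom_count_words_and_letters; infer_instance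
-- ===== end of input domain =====

-- B replaces A's accumulator loop by a filtering comprehension and a closed-form
-- letter count (total length minus number of space characters); simpler decomposition.

-- ===== PORT A =====
def count_words_and_letters (message : String) : List String × Int × Int :=
  let tmp := (PySem.Str.split? message " ").getD []
  let r := tmp.foldl
    (fun (p : List String × Int) word =>
      if word ≠ "" then (p.1 ++ [word], p.2 + PySem.Str.len word) else p)
    ([], 0)
  (r.1, (r.1.length : Int), r.2)

-- ===== PORT B =====
def count_words_and_letters_alt (message : String) : List String × Int × Int :=
  let words := ((PySem.Str.split? message " ").getD []).filter (fun w => w ≠ "")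
  (words, (words.length : Int), PySem.Str.len message - (PySem.Str.count message " " : Int))

-- ===== PRECONDITION & SPEC =====
def Spec_count_words_and_letters (message : String) (out : List String × Int × Int) : Prop := out = count_words_and_letters_alt message
instance (message : String) (out : List String × Int × Int) : Decidable (Spec_count_words_and_letters message out) := by unfold Spec_count_words_and_letters; infer_instance

-- ===== CLAIM (what is proved, stated in full; the proofs are below) =====
def Claim_equal_count_words_and_letters : Prop := ∀ (message : String), Dom_count_words_and_letters message → Spec_count_words_and_letters message (count_words_and_letters message)

-- ===== LEMMAS AND PROOFS =====

-- step equations for the fuelled PySem loops (definitional)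
theorem pv_go_cons (sep : List Char) (fuel : Nat) (c : Char) (rest cur : List Char) (acc : List (List Char)) :
    PySem.Chars.splitOn.go sep (fuel+1) (c::rest) cur acc =
      if sep.isPrefixOf (c::rest) then PySem.Chars.splitOn.go sep fuel (List.drop sep.length (c::rest)) [] (cur.reverse :: acc)
      else PySem.Chars.splitOn.go sep fuel rest (c::cur) acc := rfl

theorem pv_cgo_cons (sub : List Char) (fuel : Nat) (c : Char) (rest : List Char) (acc : Nat) :
    PySem.Chars.count.go sub (fuel+1) (c::rest) acc =
      if sub.isPrefixOf (c::rest) then PySem.Chars.count.go sub fuel (List.drop sub.length (c::rest)) (acc+1)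
      else PySem.Chars.count.go sub fuel rest acc := rfl

-- A's fold = (filter, total length); empty words contribute 0 to the sum anyway.
theorem pv_fold_eq (ws : List String) (acc : List String) (n : Int) :
    ws.foldl
      (fun (p : List String × Int) word =>
        if word ≠ "" then (p.1 ++ [word], p.2 + PySem.Str.len word) else p)
      (acc, n)
    = (acc ++ ws.filter (fun w => w ≠ ""),
       n + ((ws.map (fun w => (w.length : Int))).sum)) := by
  induction ws generalizing acc n with
  | nil => simp
  | cons w ws ih =>
    rw [List.foldl_cons]
    split_ifs with h
    · rw [ih]
      simp [h, PySem.Str.len, add_assoc]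
    · have hw : w = "" := by simpa using h
      rw [ih]
      subst hw
      simp

-- splitOn.go invariant: total length of the produced pieces.
theorem pv_go_sum (fuel : Nat) (l cur : List Char) (acc : List (List Char))
    (h : l.length ≤ fuel) :
    ((PySem.Chars.splitOn.go [' '] fuel l cur acc).map List.length).sum
      = (acc.map List.length).sum + cur.length + (l.length - l.count ' ') := by
  induction fuel generalizing l cur acc with
  | zero =>
    have : l = [] := by cases l <;> simp_all
    subst this
    rw [PySem.Chars.splitOn.go.eq_def]
    simp
  | succ fuel ih =>
    cases l with
    | nil =>
      rw [PySem.Chars.splitOn.go.eq_def]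
      simp
    | cons c rest =>
      have hcr : rest.count ' ' ≤ rest.length := List.count_le_length
      have hr : rest.length ≤ fuel := by simpa using h
      rw [pv_go_cons]
      by_cases hc : c = ' '
      · subst hc
        rw [if_pos (by simp [List.isPrefixOf])]
        rw [show List.drop [' '].length (' '::rest) = rest from rfl]
        rw [ih _ _ _ hr]
        simp
        omega
      · rw [if_neg (by simp [List.isPrefixOf, Ne.symm hc])]
        rw [ih _ _ _ hr]
        simp [hc]
        omega

-- count.go invariant: occurrences of the one-char separator = character count.
theorem pv_countgo (fuel : Nat) (l : List Char) (acc : Nat)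
    (h : l.length ≤ fuel) :
    PySem.Chars.count.go [' '] fuel l acc = acc + l.count ' ' := by
  induction fuel generalizing l acc with
  | zero =>
    have : l = [] := by cases l <;> simp_all
    subst this
    rw [PySem.Chars.count.go.eq_def]; simp
  | succ fuel ih =>
    cases l with
    | nil => rw [PySem.Chars.count.go.eq_def]; simp
    | cons c rest =>
      have hr : rest.length ≤ fuel := by simpa using h
      rw [pv_cgo_cons]
      by_cases hc : c = ' '
      · subst hc
        rw [if_pos (by simp [List.isPrefixOf])]
        rw [show List.drop [' '].length (' '::rest) = rest from rfl]
        rw [ih _ _ hr]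
        simp
        omega
      · rw [if_neg (by simp [List.isPrefixOf, Ne.symm hc])]
        rw [ih _ _ hr]
        simp [hc]

-- ===== VERDICT (by name: the statement is the Claim_ definition above) =====
theorem count_words_and_letters_spec : Claim_equal_count_words_and_letters := by
  intro message _
  unfold Spec_count_words_and_letters count_words_and_letters count_words_and_letters_alt
  have htl : (" " : String).toList = [' '] := rfl
  simp only [PySem.Str.split?, PySem.Chars.split?, htl, List.isEmpty_cons,
    Bool.false_eq_true, ↓reduceIte, Option.map_some, Option.getD_some]
  rw [pv_fold_eq]
  have hcount : PySem.Str.count message " " = message.toList.count ' ' := by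
    simp only [PySem.Str.count, htl, PySem.Chars.count]
    rw [if_neg (by simp)]
    rw [pv_countgo _ _ _ le_rfl]
    simp
  have hsum : ((PySem.Chars.splitOn message.toList [' ']).map List.length).sum
      = message.toList.length - message.toList.count ' ' := by
    unfold PySem.Chars.splitOn
    rw [pv_go_sum _ _ _ _ (by omega)]
    simp
  have hle : message.toList.count ' ' ≤ message.toList.length := List.count_le_length
  have hlen : PySem.Str.len message = (message.toList.length : Int) := by
    simp [PySem.Str.len]
  have hmap : (((PySem.Chars.splitOn message.toList [' ']).map String.ofList).map
      (fun w => (w.length : Int))).sum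
      = (((PySem.Chars.splitOn message.toList [' ']).map List.length).sum : Int) := by
    rw [List.map_map, Nat.cast_list_sum, List.map_map]
    exact congrArg List.sum (List.map_congr_left fun x hx => by simp)
  simp only [hmap, hsum, hcount, hlen, Prod.mk.injEq, List.nil_append, zero_add]
  refine ⟨by trivial, by trivial, ?_⟩
  push_cast [hle]
  omega
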